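-- pv_equiv track=rewrite | github.com/dimaslanjaka/php-proxy-hunter | src/ProxyDB.py | clean_type
-- ===== SOURCE A (Python) =====
-- from typing import Any, Callable, Dict, List, Optional, Union, cast
--
-- def clean_type(
--     item: Dict[str, Union[str, None]]
-- ) -> Dict[str, Union[str, None]]:
--     if "type" in item:
--         type_value = item.get("type")
--         if type_value is not None and type_value != "":
--             types = type_value.split("-")
--             cleaned_types = [t for t in types if t]  # Filter out empty strings
--             item["type"] = "-".join(cleaned_types)  # Re-merge with hyphen
--         else:
--             item["type"] = type_value  # Preserve None or empty string
--     return item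
-- ===== SOURCE B (Python) =====
-- from typing import Dict, Union
--
--
-- def clean_type(
--     item: Dict[str, Union[str, None]]
-- ) -> Dict[str, Union[str, None]]:
--     if "type" in item:
--         type_value = item.get("type")
--         if type_value is not None and type_value != "":
--             # Single pass over the characters: emit a hyphen only lazily,
--             # when another real character follows some earlier output.
--             out = []
--             pending = False
--             for c in type_value:
--                 if c == "-":
--                     pending = bool(out)
--                 else:
--                     if pending:
--                         out.append("-")
--                         pending = False
--                     out.append(c)
--             item["type"] = "".join(out)
--         else:
--             item["type"] = type_value  # Preserve None or empty string
--     return item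
-- ===== Notes on version B (the rewrite author's own statement) =====
-- stated objective: alternative
-- what changed: Replaces split('-') + list-comprehension filter + '-'.join with a single character-wise pass that emits a hyphen lazily only when real output precedes and a real character follows, never building the segment list.
import Mathlib
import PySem

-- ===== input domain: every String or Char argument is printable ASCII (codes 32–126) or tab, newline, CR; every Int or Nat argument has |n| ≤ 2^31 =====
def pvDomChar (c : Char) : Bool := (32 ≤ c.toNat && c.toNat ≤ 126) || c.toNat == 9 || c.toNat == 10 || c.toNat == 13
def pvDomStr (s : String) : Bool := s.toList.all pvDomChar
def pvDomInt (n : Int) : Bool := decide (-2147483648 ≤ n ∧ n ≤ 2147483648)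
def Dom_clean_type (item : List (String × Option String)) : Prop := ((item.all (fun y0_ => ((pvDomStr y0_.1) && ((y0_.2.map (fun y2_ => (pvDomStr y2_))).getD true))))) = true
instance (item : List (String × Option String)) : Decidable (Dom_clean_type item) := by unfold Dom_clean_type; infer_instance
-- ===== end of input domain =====

-- B normalizes the hyphen-separated "type" field in one character pass that emits hyphens lazily,
-- instead of A's split/filter/join; both Pythons mutate the dict in place and return it — the
-- equivalence proved here is about the returned dict.

-- ===== PORT A =====
def clean_type (item : List (String × Option String)) : List (String × Option String) :=
  let d : PySem.Dict String (Option String) := PySem.Dict.mk item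
  if d.contains "type" then
    let type_value := d.getD "type" none
    match type_value with
    | some tv =>
      if tv ≠ "" then
        let types := (PySem.Str.split? tv "-").getD []
        let cleaned_types := types.filter (fun t => t ≠ "")
        (d.insert "type" (some (PySem.Str.join "-" cleaned_types))).items
      else
        (d.insert "type" type_value).items
    | none => (d.insert "type" type_value).items
  else item

-- ===== PORT B =====
-- one loop step of Source B: a hyphen only records a pending flag (when output exists); a real
-- character flushes a pending hyphen and is appended
def pvNormStep (st : List Char × Bool) (c : Char) : List Char × Bool :=
  if c = '-' then (st.1, !st.1.isEmpty)
  else ((st.1 ++ (if st.2 then ['-'] else [])) ++ [c], false)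

def clean_type_alt (item : List (String × Option String)) : List (String × Option String) :=
  let d : PySem.Dict String (Option String) := PySem.Dict.mk item
  if d.contains "type" then
    let type_value := d.getD "type" none
    match type_value with
    | some tv =>
      if tv ≠ "" then
        let out := (tv.toList.foldl pvNormStep ([], false)).1
        (d.insert "type" (some (String.ofList out))).items
      else
        (d.insert "type" type_value).items
    | none => (d.insert "type" type_value).items
  else item

-- ===== PRECONDITION & SPEC =====
def Spec_clean_type (item : List (String × Option String)) (out : List (String × Option String)) : Prop := out = clean_type_alt item
instance (item : List (String × Option String)) (out : List (String × Option String)) : Decidable (Spec_clean_type item out) := by unfold Spec_clean_type; infer_instance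

-- ===== CLAIM (what is proved, stated in full; the proofs are below) =====
def Claim_equal_clean_type : Prop := ∀ (item : List (String × Option String)), Dom_clean_type item → Spec_clean_type item (clean_type item)

-- ===== LEMMAS AND PROOFS =====

-- structural reformulation of PySem.Chars.splitOn.go for the one-char separator '-'
def pvSplit1 : List Char → List Char → List (List Char)
  | [], cur => [cur.reverse]
  | c :: rest, cur => if c = '-' then cur.reverse :: pvSplit1 rest [] else pvSplit1 rest (c :: cur)

-- B's loop once output is nonempty: pend records whether a hyphen is pending
def pvG : Bool → List Char → List Char
  | _, [] => []
  | pend, c :: rest => if c = '-' then pvG true rest else (if pend then ['-'] else []) ++ c :: pvG false rest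

-- B's loop while output is still empty (leading hyphens are dropped)
def pvH : List Char → List Char
  | [] => []
  | c :: rest => if c = '-' then pvH rest else c :: pvG false rest

theorem pvGo_eq_split1 (fuel : Nat) (l cur : List Char) (acc : List (List Char))
    (h : l.length < fuel) :
    PySem.Chars.splitOn.go ['-'] fuel l cur acc = acc.reverse ++ pvSplit1 l cur := by
  induction fuel generalizing l cur acc with
  | zero => omega
  | succ n ih =>
    cases l with
    | nil => simp [PySem.Chars.splitOn.go, pvSplit1]
    | cons c rest =>
      simp only [PySem.Chars.splitOn.go]
      by_cases hc : c = '-'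
      · subst hc
        have hpre : List.isPrefixOf ['-'] ('-' :: rest) = true := by
          simp [List.isPrefixOf]
        rw [hpre]
        simp only [if_true, List.length_cons, List.length_nil, Nat.zero_add,
          List.drop_succ_cons, List.drop_zero]
        rw [ih rest [] _ (by simpa using Nat.lt_of_succ_lt_succ h)]
        simp [pvSplit1]
      · have hpre : List.isPrefixOf ['-'] (c :: rest) = false := by
          simp [List.isPrefixOf]
          exact fun h' => absurd h'.symm hc
        rw [hpre]
        simp only [Bool.false_eq_true, if_false]
        rw [ih rest (c :: cur) acc (by simpa using Nat.lt_of_succ_lt_succ h)]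
        simp [pvSplit1, hc]

theorem pvSplitOn_eq_split1 (cs : List Char) :
    PySem.Chars.splitOn cs ['-'] = pvSplit1 cs [] := by
  unfold PySem.Chars.splitOn
  rw [pvGo_eq_split1 _ _ _ _ (by omega)]
  simp

theorem pvFoldl_ne_nil (cs acc : List Char) (pend : Bool) (h : acc ≠ []) :
    (cs.foldl pvNormStep (acc, pend)).1 = acc ++ pvG pend cs := by
  induction cs generalizing acc pend with
  | nil => simp [pvG]
  | cons c rest ih =>
    simp only [List.foldl_cons]
    by_cases hc : c = '-'
    · subst hc
      rw [show pvNormStep (acc, pend) '-' = (acc, !acc.isEmpty) from by simp [pvNormStep]]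
      rw [ih acc _ h]
      have he : acc.isEmpty = false := by simpa using h
      rw [show pvG pend ('-' :: rest) = pvG true rest from by simp [pvG]]
      simp [he]
    · rw [show pvNormStep (acc, pend) c = ((acc ++ (if pend then ['-'] else [])) ++ [c], false) from by
        simp [pvNormStep, hc]]
      rw [ih _ false (by simp)]
      rw [show pvG pend (c :: rest) = (if pend then ['-'] else []) ++ c :: pvG false rest from by
        simp [pvG, hc]]
      simp

theorem pvFoldl_nil (cs : List Char) :
    (cs.foldl pvNormStep ([], false)).1 = pvH cs := by
  induction cs with
  | nil => simp [pvH]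
  | cons c rest ih =>
    simp only [List.foldl_cons]
    by_cases hc : c = '-'
    · subst hc
      rw [show pvNormStep ([], false) '-' = (([] : List Char), false) from by simp [pvNormStep]]
      rw [ih, show pvH ('-' :: rest) = pvH rest from by simp [pvH]]
    · rw [show pvNormStep ([], false) c = ([c], false) from by simp [pvNormStep, hc]]
      rw [pvFoldl_ne_nil rest [c] false (by simp)]
      rw [show pvH (c :: rest) = c :: pvG false rest from by simp [pvH, hc]]
      simp

theorem pvIntercalate_cons (a : List Char) (L : List (List Char)) :
    List.intercalate ['-'] (a :: L) = a ++ (if L = [] then [] else '-' :: List.intercalate ['-'] L) := by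
  cases L with
  | nil => simp [List.intercalate]
  | cons b M => simp [List.intercalate, List.intersperse]

theorem pvG_true (cs : List Char) :
    pvG true cs = if pvH cs = [] then [] else '-' :: pvH cs := by
  induction cs with
  | nil => simp [pvG, pvH]
  | cons c rest ih =>
    by_cases hc : c = '-'
    · subst hc
      rw [show pvG true ('-' :: rest) = pvG true rest from by simp [pvG]]
      rw [show pvH ('-' :: rest) = pvH rest from by simp [pvH]]
      exact ih
    · rw [show pvG true (c :: rest) = '-' :: c :: pvG false rest from by simp [pvG, hc]]
      rw [show pvH (c :: rest) = c :: pvG false rest from by simp [pvH, hc]]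
      simp

-- A's string pipeline (split on '-', drop empties, intercalate) equals B's lazy-hyphen scan,
-- proved jointly with the mid-segment invariant
theorem pvMain (cs : List Char) :
    List.intercalate ['-'] ((pvSplit1 cs []).filter (fun t => t ≠ [])) = pvH cs ∧
    ∀ cur : List Char, cur ≠ [] →
      List.intercalate ['-'] ((pvSplit1 cs cur).filter (fun t => t ≠ [])) = cur.reverse ++ pvG false cs := by
  induction cs with
  | nil =>
    refine ⟨by simp [pvSplit1, pvH, List.intercalate], ?_⟩
    intro cur hcur
    simp [pvSplit1, pvG, List.intercalate, hcur]
  | cons c rest ih =>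
    have aux : (if ((pvSplit1 rest []).filter (fun t => t ≠ [])) = [] then ([] : List Char)
        else '-' :: List.intercalate ['-'] ((pvSplit1 rest []).filter (fun t => t ≠ []))) = pvG true rest := by
      rw [pvG_true]
      rcases hF : (pvSplit1 rest []).filter (fun t => t ≠ []) with _ | ⟨a, L⟩
      · have h0 : pvH rest = [] := by rw [← ih.1, hF]; simp [List.intercalate]
        simp [h0]
      · have ha : a ≠ [] := by
          have : a ∈ (pvSplit1 rest []).filter (fun t => t ≠ []) := by rw [hF]; simp
          simpa using (List.mem_filter.mp this).2
        have ih1' := ih.1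
        rw [hF] at ih1'
        have hne : pvH rest ≠ [] := by
          rw [← ih1', pvIntercalate_cons]
          intro h
          exact ha (List.append_eq_nil_iff.mp h).1
        rw [if_neg (by simp), if_neg hne, ih1']
    constructor
    · by_cases hc : c = '-'
      · subst hc
        rw [show pvSplit1 ('-' :: rest) [] = [].reverse :: pvSplit1 rest [] from by simp [pvSplit1]]
        rw [show pvH ('-' :: rest) = pvH rest from by simp [pvH]]
        rw [List.reverse_nil, List.filter_cons]
        simp only [ne_eq, not_true_eq_false, decide_false, Bool.false_eq_true, if_false]
        exact ih.1
      · rw [show pvSplit1 (c :: rest) [] = pvSplit1 rest [c] from by simp [pvSplit1, hc]]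
        rw [show pvH (c :: rest) = c :: pvG false rest from by simp [pvH, hc]]
        rw [ih.2 [c] (by simp)]
        simp
    · intro cur hcur
      by_cases hc : c = '-'
      · subst hc
        rw [show pvSplit1 ('-' :: rest) cur = cur.reverse :: pvSplit1 rest [] from by simp [pvSplit1]]
        rw [show pvG false ('-' :: rest) = pvG true rest from by simp [pvG]]
        rw [List.filter_cons]
        have hrc : (decide (cur.reverse ≠ [])) = true := by simpa using hcur
        rw [hrc, if_pos rfl, pvIntercalate_cons, aux]
      · rw [show pvSplit1 (c :: rest) cur = pvSplit1 rest (c :: cur) from by simp [pvSplit1, hc]]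
        rw [show pvG false (c :: rest) = c :: pvG false rest from by simp [pvG, hc]]
        rw [ih.2 (c :: cur) (by simp)]
        simp

theorem pvStr_main (tv : String) :
    PySem.Str.join "-" ((((PySem.Str.split? tv "-").getD []).filter (fun t => t ≠ ""))) =
      String.ofList ((tv.toList.foldl pvNormStep ([], false)).1) := by
  rw [PySem.Str.split?]
  rw [show ("-" : String).toList = ['-'] from by decide]
  rw [PySem.Chars.split?]
  simp only [List.isEmpty_cons, Option.map_some, Option.getD_some, if_false, Bool.false_eq_true]
  rw [List.filter_map]
  rw [show ((fun t => decide (t ≠ "")) ∘ String.ofList) = (fun t => decide (t ≠ [])) from by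
    funext t; simp [Function.comp]]
  rw [PySem.Str.join]
  rw [show ("-" : String).toList = ['-'] from by decide]
  rw [List.map_map]
  rw [show (String.toList ∘ String.ofList) = id from by funext l; simp]
  rw [List.map_id]
  rw [PySem.Chars.join]
  rw [pvSplitOn_eq_split1, pvFoldl_nil, (pvMain tv.toList).1]

-- ===== VERDICT (by name: the statement is the Claim_ definition above) =====
theorem clean_type_spec : Claim_equal_clean_type := by
  intro item _
  unfold Spec_clean_type clean_type clean_type_alt
  by_cases hC : (PySem.Dict.mk item).contains "type" = true
  · simp only [hC, if_true]
    rcases hv : (PySem.Dict.mk item).getD "type" none with _ | tv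
    · rfl
    · by_cases he : tv = ""
      · simp [he]
      · simp only [ne_eq, he, not_false_eq_true, if_true]
        rw [pvStr_main tv]
  · simp only [hC, Bool.false_eq_true, if_false]
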